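-- pv_equiv track=rewrite | github.com/stilyantanev/Programming101-v3 | week1/2-The-Real-Deal/contains_digits.py | contains_digits
-- ===== SOURCE A (Python) =====
-- def contains_digits(number, digits):
--     number_digits = []
--     is_contains = True
--
--     while number > 0:
--         number_digits += [number % 10]
--         number = number // 10
--
--     for digit in digits:
--         if digit in number_digits:
--             is_contains = True
--         else:
--             is_contains = False
--             return is_contains
--
--     return is_contains
-- ===== SOURCE B (Python) =====
-- def contains_digits(number, digits):
--     for d in digits:
--         n = number
--         found = False
--         while n > 0:
--             if n % 10 == d:
--                 found = True
--                 break
--             n = n // 10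
--         if not found:
--             return False
--     return True
-- ===== Notes on version B (the rewrite author's own statement) =====
-- stated objective: alternative
-- what changed: B never materialises the list of number's digits: for each query digit it rescans number with %10 // 10 and short-circuits on the first hit, so no list is built or searched.
import Mathlib
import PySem

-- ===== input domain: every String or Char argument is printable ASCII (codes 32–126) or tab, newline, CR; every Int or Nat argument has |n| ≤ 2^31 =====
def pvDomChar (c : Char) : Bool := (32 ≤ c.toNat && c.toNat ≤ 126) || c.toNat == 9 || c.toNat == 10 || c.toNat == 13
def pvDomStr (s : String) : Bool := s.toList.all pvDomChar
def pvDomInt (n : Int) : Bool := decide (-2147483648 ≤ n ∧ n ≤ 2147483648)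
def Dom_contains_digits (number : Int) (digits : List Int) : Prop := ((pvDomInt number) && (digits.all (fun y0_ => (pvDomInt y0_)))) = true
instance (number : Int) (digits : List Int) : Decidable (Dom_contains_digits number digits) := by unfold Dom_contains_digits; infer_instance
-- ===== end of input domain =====

-- B is an alternative decomposition: per query digit it rescans number with %10 // 10 and short-circuits, building no list; return values proved equal on all inputs.

-- ===== PORT A =====
-- the while loop: number_digits += [number % 10]; number //= 10
def pvLoopA (n : Int) (acc : List Int) : List Int :=
  if _h : n > 0 then pvLoopA (PySem.Int.floordiv n 10) (acc ++ [PySem.Int.mod n 10]) else acc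
termination_by n.toNat
decreasing_by
  rw [PySem.Int.floordiv_eq_ediv_of_pos (by omega : (0:Int) < 10)]
  omega

-- the for loop over digits, with the early return False
def pvForA (number_digits : List Int) : List Int → Bool
  | [] => true
  | d :: rest => if d ∈ number_digits then pvForA number_digits rest else false

def contains_digits (number : Int) (digits : List Int) : Bool :=
  pvForA (pvLoopA number []) digits

-- ===== PORT B =====
-- the inner while loop for one query digit d: break on hit, else n //= 10
def pvScanB (d n : Int) : Bool :=
  if _h : n > 0 then
    if PySem.Int.mod n 10 = d then true else pvScanB d (PySem.Int.floordiv n 10)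
  else false
termination_by n.toNat
decreasing_by
  rw [PySem.Int.floordiv_eq_ediv_of_pos (by omega : (0:Int) < 10)]
  omega

def contains_digits_alt (number : Int) (digits : List Int) : Bool :=
  match digits with
  | [] => true
  | d :: rest => if pvScanB d number then contains_digits_alt number rest else false

-- ===== PRECONDITION & SPEC =====
def Spec_contains_digits (number : Int) (digits : List Int) (out : Bool) : Prop := out = contains_digits_alt number digits
instance (number : Int) (digits : List Int) (out : Bool) : Decidable (Spec_contains_digits number digits out) := by unfold Spec_contains_digits; infer_instance

-- ===== CLAIM (what is proved, stated in full; the proofs are below) =====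
def Claim_equal_contains_digits : Prop := ∀ (number : Int) (digits : List Int), Dom_contains_digits number digits → Spec_contains_digits number digits (contains_digits number digits)

-- ===== LEMMAS AND PROOFS =====
theorem pvLoopA_acc (n : Int) (acc : List Int) : pvLoopA n acc = acc ++ pvLoopA n [] := by
  conv_lhs => rw [pvLoopA.eq_def]
  conv_rhs => rw [pvLoopA.eq_def]
  by_cases h : n > 0
  · rw [dif_pos h, dif_pos h,
        pvLoopA_acc (PySem.Int.floordiv n 10) (acc ++ [PySem.Int.mod n 10]),
        pvLoopA_acc (PySem.Int.floordiv n 10) ([] ++ [PySem.Int.mod n 10])]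
    simp
  · rw [dif_neg h, dif_neg h]; simp
termination_by n.toNat
decreasing_by
  all_goals rw [PySem.Int.floordiv_eq_ediv_of_pos (by omega : (0:Int) < 10)]; omega

theorem pvScanB_eq_mem (d n : Int) : pvScanB d n = decide (d ∈ pvLoopA n []) := by
  induction n using pvScanB.induct d with
  | case1 n h hd =>
    rw [pvScanB, dif_pos h, if_pos hd, pvLoopA, dif_pos h, pvLoopA_acc]
    exact (decide_eq_true (List.mem_append.mpr (Or.inl (List.mem_singleton.mpr hd.symm)))).symm
  | case2 n h hd ih =>
    rw [pvScanB, dif_pos h, if_neg hd, pvLoopA, dif_pos h, pvLoopA_acc, ih, decide_eq_decide]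
    rw [List.nil_append, List.singleton_append, List.mem_cons]
    exact (or_iff_right (fun hh => hd hh.symm)).symm
  | case3 n h =>
    rw [pvScanB, dif_neg h, pvLoopA, dif_neg h]; simp

theorem pvFor_eq_alt (number : Int) (digits : List Int) :
    pvForA (pvLoopA number []) digits = contains_digits_alt number digits := by
  induction digits with
  | nil => rfl
  | cons d rest ih =>
    rw [pvForA, contains_digits_alt, pvScanB_eq_mem]
    by_cases hm : d ∈ pvLoopA number [] <;> simp [hm, ih]

-- ===== VERDICT (by name: the statement is the Claim_ definition above) =====
theorem contains_digits_spec : Claim_equal_contains_digits := by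
  intro number digits _
  unfold Spec_contains_digits contains_digits
  exact pvFor_eq_alt number digits
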